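-- pv_equiv track=rewrite | github.com/ZephyrBlu/sequence-tools | combination_memoization.py | generate_sequence_tokens
-- ===== SOURCE A (Python) =====
-- MAX_TOKEN_SIZE = 8
--
-- def generate_sequence_tokens(sequence):
--     tokens = set()
--     iterations = 0
--
--     for token_start_position in range(0, len(sequence)):
--         for token_size in range(1, MAX_TOKEN_SIZE):
--             token = tuple(sequence[token_start_position:token_start_position + token_size])
--
--             tokens.add(token)
--             iterations += 1
--
--             # exit if we're at the end of the build
--             if token_start_position + token_size >= len(sequence):
--                 break
--
--     return tokens, iterations
-- ===== SOURCE B (Python) =====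
-- MAX_TOKEN_SIZE = 8
--
-- def generate_sequence_tokens(sequence):
--     n = len(sequence)
--     tokens = {tuple(sequence[p:p + s])
--               for p in range(n)
--               for s in range(1, MAX_TOKEN_SIZE)}
--     iterations = n * (n + 1) // 2 if n <= 7 else 7 * n - 21
--     return tokens, iterations
-- ===== Notes on version B (the rewrite author's own statement) =====
-- stated objective: simpler
-- what changed: Replaces the nested loop with break and the incremented counter by a single set comprehension over all (position, size) pairs (the set dedups the clamped tail slices the break used to skip) and a closed-form count n*(n+1)//2 for n<=7 else 7*n-21.
import Mathlib
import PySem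

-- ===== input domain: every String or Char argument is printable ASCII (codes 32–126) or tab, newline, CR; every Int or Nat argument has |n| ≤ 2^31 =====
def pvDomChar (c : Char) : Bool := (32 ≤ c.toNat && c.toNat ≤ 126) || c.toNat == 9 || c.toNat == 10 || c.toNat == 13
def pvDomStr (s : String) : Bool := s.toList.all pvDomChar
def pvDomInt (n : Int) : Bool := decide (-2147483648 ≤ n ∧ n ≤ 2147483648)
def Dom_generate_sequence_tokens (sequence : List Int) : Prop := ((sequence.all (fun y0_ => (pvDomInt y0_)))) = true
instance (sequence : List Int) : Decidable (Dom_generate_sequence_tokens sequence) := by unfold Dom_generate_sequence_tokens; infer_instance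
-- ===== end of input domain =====

-- B replaces A's nested loop with break and running counter by one set comprehension
-- over all (position, size) pairs plus a closed-form iteration count (objective: simpler).


-- ===== PORT A =====
-- the inner 'for token_size in range(1, MAX_TOKEN_SIZE)' loop with its break,
-- as structural recursion over the (already materialised) range list
def innerA (sequence : List Int) (p : Int) :
    List Int → PySem.Set (List Int) × Int → PySem.Set (List Int) × Int
  | [], st => st
  | s :: rest, (tokens, iterations) =>
      let token := PySem.List.slice sequence (some p) (some (p + s))
      let tokens := PySem.Set.add tokens token
      let iterations := iterations + 1
      if p + s ≥ PySem.List.len sequence then (tokens, iterations)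
      else innerA sequence p rest (tokens, iterations)

def generate_sequence_tokens (sequence : List Int) : List (List Int) × Int :=
  (PySem.List.pyRange 0 (PySem.List.len sequence) 1).foldl
    (fun st p => innerA sequence p (PySem.List.pyRange 1 8 1) st)
    (PySem.Set.empty, 0)

-- ===== PORT B =====
def generate_sequence_tokens_alt (sequence : List Int) : List (List Int) × Int :=
  let n : Int := PySem.List.len sequence
  let tokens : PySem.Set (List Int) :=
    PySem.Set.ofList
      ((PySem.List.pyRange 0 n 1).flatMap (fun p =>
        (PySem.List.pyRange 1 8 1).map (fun s =>
          PySem.List.slice sequence (some p) (some (p + s)))))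
  let iterations : Int :=
    if n ≤ 7 then PySem.Int.floordiv (n * (n + 1)) 2 else 7 * n - 21
  (tokens, iterations)

-- ===== PRECONDITION & SPEC =====
def Spec_generate_sequence_tokens (sequence : List Int) (out : List (List Int) × Int) : Prop := out = generate_sequence_tokens_alt sequence
instance (sequence : List Int) (out : List (List Int) × Int) : Decidable (Spec_generate_sequence_tokens sequence out) := by unfold Spec_generate_sequence_tokens; infer_instance

-- ===== CLAIM (what is proved, stated in full; the proofs are below) =====
def Claim_equal_generate_sequence_tokens : Prop := ∀ (sequence : List Int), Dom_generate_sequence_tokens sequence → Spec_generate_sequence_tokens sequence (generate_sequence_tokens sequence)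

-- ===== LEMMAS AND PROOFS =====

-- B's per-position fold: add the seven clamped slices starting at p
def bStep (sequence : List Int) (T : PySem.Set (List Int)) (p : Int) : PySem.Set (List Int) :=
  (PySem.List.pyRange 1 8 1).foldl
    (fun T s => PySem.Set.add T (PySem.List.slice sequence (some p) (some (p + s)))) T

-- A's inner loop at position q does B's seven adds (the ones past the break are
-- re-adds of the clamped tail) and counts min 7 (n - q)
theorem innerA_eq (sequence : List Int) (q : Nat)
    (hlt : (q : Int) < PySem.List.len sequence) (T : PySem.Set (List Int)) (i : Int) :
    innerA sequence (q : Int) (PySem.List.pyRange 1 8 1) (T, i)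
      = (bStep sequence T (q : Int), i + min 7 (PySem.List.len sequence - (q : Int))) := by
  have hr : PySem.List.pyRange 1 8 1 = [1, 2, 3, 4, 5, 6, 7] := by decide
  rw [hr]
  simp only [bStep, hr, List.foldl_cons, List.foldl_nil]
  have hs : ∀ s : Nat, PySem.List.slice sequence (some (q : Int)) (some ((q : Int) + (s : Int)))
      = (sequence.drop q).take s := fun s => PySem.List.slice_natCast_add sequence q s
  simp only [innerA, PySem.List.len_eq] at *
  set n := (sequence.length : Int) with hn
  have e1 := hs 1
  have e2 := hs 2
  have e3 := hs 3
  have e4 := hs 4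
  have e5 := hs 5
  have e6 := hs 6
  have e7 := hs 7
  push_cast at e1 e2 e3 e4 e5 e6 e7
  simp only [e1, e2, e3, e4, e5, e6, e7, ite_self]
  by_cases h7 : 7 ≤ sequence.length - q
  · rw [if_neg (by omega), if_neg (by omega), if_neg (by omega), if_neg (by omega),
      if_neg (by omega), if_neg (by omega)]
    simp only [Prod.mk.injEq]
    exact ⟨trivial, by omega⟩
  · have hm1 : 1 ≤ sequence.length - q := by omega
    have hm6 : sequence.length - q ≤ 6 := by omega
    set m := sequence.length - q with hmdef
    interval_cases m
    · rw [if_pos (by omega)]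
      simp only [Prod.mk.injEq]
      constructor
      · simp [List.take_of_length_le, ← hmdef]
      · omega
    · rw [if_neg (by omega), if_pos (by omega)]
      simp only [Prod.mk.injEq]
      constructor
      · simp [List.take_of_length_le, ← hmdef]
      · omega
    · rw [if_neg (by omega), if_neg (by omega), if_pos (by omega)]
      simp only [Prod.mk.injEq]
      constructor
      · simp [List.take_of_length_le, ← hmdef]
      · omega
    · rw [if_neg (by omega), if_neg (by omega), if_neg (by omega), if_pos (by omega)]
      simp only [Prod.mk.injEq]
      constructor
      · simp [List.take_of_length_le, ← hmdef]
      · omega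
    · rw [if_neg (by omega), if_neg (by omega), if_neg (by omega), if_neg (by omega),
        if_pos (by omega)]
      simp only [Prod.mk.injEq]
      constructor
      · simp [List.take_of_length_le, ← hmdef]
      · omega
    · rw [if_neg (by omega), if_neg (by omega), if_neg (by omega), if_neg (by omega),
        if_neg (by omega), if_pos (by omega)]
      simp only [Prod.mk.injEq]
      constructor
      · simp [List.take_of_length_le, ← hmdef]
      · omega

-- splitting a fold over a pair whose components evolve independently
theorem foldl_pair {α β : Type} (f : β × Int → α → β × Int) (g : β → α → β) (h : α → Int)
    (l : List α) (H : ∀ x ∈ l, ∀ T i, f (T, i) x = (g T x, i + h x)) :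
    ∀ T i, l.foldl f (T, i) = (l.foldl g T, i + (l.map h).sum) := by
  induction l with
  | nil => intro T i; simp
  | cons x t ih =>
      intro T i
      simp only [List.foldl_cons, List.map_cons, List.sum_cons]
      rw [H x (by simp), ih (fun y hy => H y (by simp [hy]))]
      ring_nf

-- the closed-form iteration count, as a function of the sequence length
def F (c : Nat) : Int := if c ≤ 7 then ((c * (c + 1) / 2 : Nat) : Int) else 7 * c - 21

theorem F_succ (c : Nat) : F (c + 1) = min 7 ((c : Int) + 1) + F c := by
  have key : (c + 1) * (c + 1 + 1) / 2 = c * (c + 1) / 2 + (c + 1) := by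
    rw [show (c + 1) * (c + 1 + 1) = c * (c + 1) + 2 * (c + 1) by ring,
      Nat.add_mul_div_left _ _ (by norm_num)]
  rcases Nat.lt_or_ge c 7 with hc | hc
  · have h1 : c + 1 ≤ 7 := by omega
    have h2 : c ≤ 7 := by omega
    simp only [F, if_pos h1, if_pos h2, key]
    push_cast
    omega
  · rcases Nat.eq_or_lt_of_le hc with hc7 | hc7
    · subst hc7; norm_num [F]
    · have h1 : ¬ (c + 1 ≤ 7) := by omega
      have h2 : ¬ (c ≤ 7) := by omega
      simp only [F, if_neg h1, if_neg h2]
      push_cast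
      omega

theorem sum_min (n : Int) : ∀ c : Nat, (c : Int) ≤ n →
    ((PySem.List.pyRange (n - c) n 1).map (fun p => min 7 (n - p))).sum = F c := by
  intro c
  induction c with
  | zero => intro _; simp [PySem.List.pyRange_one_eq_nil, F]
  | succ c ih =>
      intro hc
      rw [PySem.List.pyRange_one_cons (by push_cast; omega)]
      push_cast
      rw [List.map_cons, List.sum_cons]
      have := ih (by push_cast at hc ⊢; omega)
      push_cast at this
      rw [show n - (↑c + 1) + 1 = n - ↑c by ring, this, F_succ,
        show n - (n - (↑c + 1)) = (c : Int) + 1 by ring]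

-- ===== VERDICT (by name: the statement is the Claim_ definition above) =====
theorem generate_sequence_tokens_spec : Claim_equal_generate_sequence_tokens := by
  intro sequence _
  unfold Spec_generate_sequence_tokens generate_sequence_tokens generate_sequence_tokens_alt
  -- split A's fold into the token fold and the count sum
  rw [foldl_pair _ (bStep sequence) (fun p => min 7 (PySem.List.len sequence - p)) _
    (fun p hp T i => by
      rw [PySem.List.mem_pyRange_one] at hp
      obtain ⟨q, rfl⟩ := Int.eq_ofNat_of_zero_le hp.1
      exact innerA_eq sequence q hp.2 T i)]
  simp only [Prod.mk.injEq]
  constructor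
  · -- tokens: B's comprehension is the same fold of adds
    rw [show PySem.Set.ofList
        ((PySem.List.pyRange 0 (PySem.List.len sequence) 1).flatMap (fun p =>
          (PySem.List.pyRange 1 8 1).map (fun s =>
            PySem.List.slice sequence (some p) (some (p + s)))))
      = ((PySem.List.pyRange 0 (PySem.List.len sequence) 1).flatMap (fun p =>
          (PySem.List.pyRange 1 8 1).map (fun s =>
            PySem.List.slice sequence (some p) (some (p + s))))).foldl PySem.Set.add []
      from PySem.Set.ofList_eq_foldl _, List.foldl_flatMap]
    simp only [List.foldl_map]
    rfl
  · -- iterations: the sum of min 7 (n - p) has the closed form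
    have := sum_min (PySem.List.len sequence) sequence.length (by simp [PySem.List.len_eq])
    rw [show PySem.List.len sequence - (sequence.length : Int) = 0 by simp [PySem.List.len_eq]]
      at this
    rw [zero_add, this, F]
    simp only [PySem.List.len_eq]
    split_ifs with h1 h2 h3
    · rw [show ((sequence.length : Int) * ((sequence.length : Int) + 1))
          = ((sequence.length * (sequence.length + 1) : Nat) : Int) by push_cast; ring,
        show (2 : Int) = ((2 : Nat) : Int) by norm_num,
        PySem.Int.floordiv_natCast]
    · omega
    · omega
    · ring
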